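-- pv_equiv track=rewrite | github.com/IvanKalug-QA/codewars | Coding_Meetup_8_Higher_Order_Functions_Series_Will_all_continents_be_represented.py | all_continents
-- ===== SOURCE A (Python) =====
-- def all_continents(lst):
--     d = dict()
--     for i in lst:
--         d[i['continent']] = d.get(i['continent'], 0) + 1
--     res = list()
--     for i in d:
--         if i in ['Africa', 'Americas', 'Asia', 'Europe', 'Oceania']:
--             if i not in res:
--                 res.append(i)
--     return len(res) == len(['Africa', 'Americas', 'Asia', 'Europe', 'Oceania'])
-- ===== SOURCE B (Python) =====
-- def all_continents(lst):
--     return all(any(i['continent'] == c for i in lst)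
--                for c in ('Africa', 'Americas', 'Asia', 'Europe', 'Oceania'))
-- ===== Notes on version B (the rewrite author's own statement) =====
-- stated objective: alternative
-- what changed: Instead of one pass that builds a counting dict followed by a filtering loop and a length comparison, B runs one short-circuiting membership scan of the list per required continent (all/any over the five names) and builds no intermediate collection at all.
import Mathlib
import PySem

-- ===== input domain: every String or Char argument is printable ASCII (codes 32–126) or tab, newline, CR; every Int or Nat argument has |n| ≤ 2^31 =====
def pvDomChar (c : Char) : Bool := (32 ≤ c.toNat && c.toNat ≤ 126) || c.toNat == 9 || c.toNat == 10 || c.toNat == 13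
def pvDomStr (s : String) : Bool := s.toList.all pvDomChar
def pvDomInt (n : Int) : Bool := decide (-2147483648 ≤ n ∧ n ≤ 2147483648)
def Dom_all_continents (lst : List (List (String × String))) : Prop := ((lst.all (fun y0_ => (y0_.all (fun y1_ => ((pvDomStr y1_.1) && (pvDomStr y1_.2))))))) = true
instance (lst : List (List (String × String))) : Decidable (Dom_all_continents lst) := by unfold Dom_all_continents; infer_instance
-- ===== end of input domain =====

-- B drops A's counting dict, filtering loop and length comparison and instead makes one
-- short-circuiting membership scan of the list per required continent (objective: alternative).

-- shared by both ports: the Python subscript i['continent'] (first match in the row)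
def pvKey (i : List (String × String)) : String := (PySem.Dict.mk i).getD "continent" ""

-- ===== PORT A =====
def all_continents (lst : List (List (String × String))) : Bool :=
  ((((lst.foldl (fun d i => d.insert (pvKey i) (d.getD (pvKey i) 0 + 1))
      (PySem.Dict.empty : PySem.Dict String Int)).keys).foldl (fun res i =>
        if (["Africa", "Americas", "Asia", "Europe", "Oceania"] : List String).contains i then
          if !(res.contains i) then res ++ [i] else res
        else res) ([] : List String)).length)
    == (["Africa", "Americas", "Asia", "Europe", "Oceania"] : List String).length

-- ===== PORT B =====
def all_continents_alt (lst : List (List (String × String))) : Bool :=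
  (["Africa", "Americas", "Asia", "Europe", "Oceania"] : List String).all
    (fun c => lst.any (fun i => pvKey i == c))

-- ===== PRECONDITION & SPEC =====
-- Pre_ excludes exactly the inputs where some row lacks the key "continent": Python A
-- (and B alike, on nonempty input) raises KeyError there.
def Pre_all_continents (lst : List (List (String × String))) : Prop :=
  ∀ i ∈ lst, (PySem.Dict.mk i).contains "continent" = true
instance (lst : List (List (String × String))) : Decidable (Pre_all_continents lst) := by
  unfold Pre_all_continents; infer_instance

def pvWitness_all_continents : (List (List (String × String))) :=
  [[("continent", "Asia")], [("continent", "Europe"), ("name", "x")]]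

def Spec_all_continents (lst : List (List (String × String))) (out : Bool) : Prop := out = all_continents_alt lst
instance (lst : List (List (String × String))) (out : Bool) : Decidable (Spec_all_continents lst out) := by unfold Spec_all_continents; infer_instance

-- ===== CLAIM (what is proved, stated in full; the proofs are below) =====
def Claim_equal_all_continents : Prop := ∀ (lst : List (List (String × String))), Dom_all_continents lst → Pre_all_continents lst → Spec_all_continents lst (all_continents lst)

-- ===== LEMMAS AND PROOFS =====

theorem pv_step_eq (res : List String) (i : String) :
    (if !(res.contains i) then res ++ [i] else res) = PySem.Set.add res i := by
  cases h : res.contains i <;> simp [PySem.Set.add] <;> simpa using h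

theorem pv_filter_count (t : List String) (ht : t.Nodup) :
    ((t.filter (fun i => (["Africa", "Americas", "Asia", "Europe", "Oceania"] : List String).contains i)).length
        = (["Africa", "Americas", "Asia", "Europe", "Oceania"] : List String).length)
      ↔ (∀ x ∈ (["Africa", "Americas", "Asia", "Europe", "Oceania"] : List String), x ∈ t) := by
  have hperm :
      (t.filter (fun i => (["Africa", "Americas", "Asia", "Europe", "Oceania"] : List String).contains i)).Perm
        ((["Africa", "Americas", "Asia", "Europe", "Oceania"] : List String).filter (fun i => t.contains i)) := by
    rw [List.perm_ext_iff_of_nodup (ht.filter _) ((by decide : (["Africa", "Americas", "Asia", "Europe", "Oceania"] : List String).Nodup).filter _)]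
    intro a
    simp [List.mem_filter, and_comm]
  rw [hperm.length_eq, List.length_filter_eq_length_iff]
  simp

theorem all_continents_spec : Claim_equal_all_continents := by
  intro lst _ _
  unfold Spec_all_continents all_continents all_continents_alt
  have hkeys :
      (lst.foldl (fun d i => d.insert (pvKey i) (d.getD (pvKey i) 0 + 1))
        (PySem.Dict.empty : PySem.Dict String Int)).keys
        = PySem.Set.ofList (lst.map pvKey) := by
    rw [PySem.Dict.keys_foldl_insert_key]
    simp [PySem.Set.update_nil_left]
  rw [hkeys]
  have hnd : (PySem.Set.ofList (lst.map pvKey)).Nodup := PySem.Set.nodup_ofList _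
  set ks : List String := PySem.Set.ofList (lst.map pvKey) with hks
  have hres :
      (ks.foldl (fun res i =>
        if (["Africa", "Americas", "Asia", "Europe", "Oceania"] : List String).contains i then
          if !(res.contains i) then res ++ [i] else res
        else res) ([] : List String))
      = ks.filter (fun i => (["Africa", "Americas", "Asia", "Europe", "Oceania"] : List String).contains i) := by
    have h1 : (ks.foldl (fun res i =>
        if (["Africa", "Americas", "Asia", "Europe", "Oceania"] : List String).contains i then
          if !(res.contains i) then res ++ [i] else res
        else res) ([] : List String))
        = (ks.filter (fun i => (["Africa", "Americas", "Asia", "Europe", "Oceania"] : List String).contains i)).foldl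
            PySem.Set.add [] := by
      rw [List.foldl_filter]
      congr 1
      funext res i
      rw [pv_step_eq]
    rw [h1, ← PySem.Set.ofList_eq_foldl,
      PySem.Set.ofList_eq_self_of_nodup _ (hnd.filter _)]
  rw [hres]
  have hiff := pv_filter_count ks hnd
  have hmem : ∀ x, x ∈ ks ↔ ∃ i ∈ lst, pvKey i = x := by
    intro x
    simp [hks, PySem.Set.mem_ofList, List.mem_map]
  rw [Bool.eq_iff_iff]
  simp only [beq_iff_eq, List.all_eq_true, List.any_eq_true]
  rw [hiff]
  exact forall₂_congr fun x _ => by rw [hmem]
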